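-- pv_equiv track=rewrite | github.com/mdnoyes/denovo_calling | sex_chromosomes/variant_calling/females/indels/scripts/find_indels_in_trs.py | get_motif
-- ===== SOURCE A (Python) =====
-- def find_subunit(s):
-- 	i = (s+s).find(s, 1, -1)
-- 	return None if i == -1 else s[:i]
--
-- def get_indel(variant_info):
-- 	if len(variant_info[3]) > 1:
-- 		return variant_info[3], 'deletion'
-- 	else:
-- 		return variant_info[4], 'insertion'
--
-- def get_motif_change(indel_sequence, indel_type, motif):
-- 	motif_count_change = indel_sequence.count(motif)
-- 	if indel_type == 'insertion':
-- 		return f'+{motif_count_change}'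
-- 	elif indel_type == 'deletion':
-- 		return f'-{motif_count_change}'
--
-- def get_motif(variant_info, motif_list):
-- 	indel, indel_type = get_indel(variant_info)
--
-- 	indel_motif = find_subunit(indel)
-- 	if not indel_motif:
-- 		indel_motif = indel
--
-- 	for motif_sequence, consensus_len, start_pos, purity in motif_list:
-- 		if purity != 100:
-- 			continue
-- 		if motif_sequence == indel_motif:
-- 			motif_size = len(indel_motif)
-- 			motif_change = get_motif_change(indel, indel_type, indel_motif)
--
-- 			if motif_size < 7:
-- 				str_status = 'True'
-- 			else:
-- 				str_status = 'False'
--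
-- 			return [str_status, indel_motif, str(motif_size), start_pos, consensus_len, motif_change]
--
-- 	return [str(len(indel))]
-- ===== SOURCE B (Python) =====
-- def get_motif(variant_info, motif_list):
-- 	if len(variant_info[3]) > 1:
-- 		indel, sign = variant_info[3], '-'
-- 	else:
-- 		indel, sign = variant_info[4], '+'
--
-- 	n = len(indel)
-- 	# smallest repeating subunit by divisor iteration; falls back to the indel itself
-- 	motif = next((indel[:d] for d in range(1, n)
-- 	              if n % d == 0 and indel[:d] * (n // d) == indel), indel)
--
-- 	hit = next((m for m in motif_list if m[3] == 100 and m[0] == motif), None)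
-- 	if hit is None:
-- 		return [str(n)]
-- 	_, consensus_len, start_pos, _ = hit
-- 	return [str(len(motif) < 7), motif, str(len(motif)),
-- 	        start_pos, consensus_len, f'{sign}{indel.count(motif)}']
-- ===== Notes on version B (the rewrite author's own statement) =====
-- stated objective: idiomatic
-- what changed: The smallest repeating subunit is found by divisor iteration (smallest d dividing len(indel) with indel == indel[:d]*(len//d)) instead of the (s+s).find(s,1,-1) rotation trick, and the motif scan and result assembly are rewritten as next() over generator expressions instead of an explicit loop with branches and helper functions.
import Mathlib
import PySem

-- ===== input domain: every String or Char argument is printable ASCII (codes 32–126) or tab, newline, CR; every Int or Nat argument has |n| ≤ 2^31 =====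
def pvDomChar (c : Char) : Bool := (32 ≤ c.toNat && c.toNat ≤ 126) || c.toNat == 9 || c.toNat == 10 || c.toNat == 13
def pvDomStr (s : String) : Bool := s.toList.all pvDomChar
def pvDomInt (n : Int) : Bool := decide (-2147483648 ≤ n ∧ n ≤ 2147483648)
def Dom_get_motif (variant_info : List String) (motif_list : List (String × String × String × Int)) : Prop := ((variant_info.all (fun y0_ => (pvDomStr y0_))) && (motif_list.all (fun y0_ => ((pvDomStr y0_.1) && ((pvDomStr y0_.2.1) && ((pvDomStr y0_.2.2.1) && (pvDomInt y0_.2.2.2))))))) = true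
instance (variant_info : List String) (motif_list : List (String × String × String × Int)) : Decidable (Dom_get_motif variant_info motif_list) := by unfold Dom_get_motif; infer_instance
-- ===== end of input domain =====

-- B finds the smallest repeating subunit by divisor iteration (instead of the (s+s).find(s,1,-1)
-- rotation trick) and replaces A's explicit scan loop and helper functions by first-match selection;
-- objective: idiomatic, same cost.


-- ===== PORT A =====
def find_subunit (s : String) : Option String :=
  let i := PySem.Str.findFrom (s ++ s) s 1 (some (-1))
  if i = -1 then none else some (PySem.Str.slice s none (some i))

def get_indel (variant_info : List String) : String × String :=
  if 1 < PySem.Str.len (PySem.List.pyGetD variant_info 3 "") then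
    (PySem.List.pyGetD variant_info 3 "", "deletion")
  else
    (PySem.List.pyGetD variant_info 4 "", "insertion")

-- the `none` branch is Python's implicit `return None`; it is unreachable from get_motif
-- (indel_type is always 'insertion' or 'deletion'), where the port defaults it to "".
def get_motif_change (indel_sequence indel_type motif : String) : Option String :=
  let motif_count_change : Int := PySem.Str.count indel_sequence motif
  if indel_type = "insertion" then some ("+" ++ PySem.Int.toStr motif_count_change)
  else if indel_type = "deletion" then some ("-" ++ PySem.Int.toStr motif_count_change)
  else none

def get_motif_loop (indel indel_type indel_motif : String) :
    List (String × String × String × Int) → List String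
  | [] => [PySem.Int.toStr (PySem.Str.len indel)]
  | (motif_sequence, consensus_len, start_pos, purity) :: rest =>
    if purity ≠ 100 then get_motif_loop indel indel_type indel_motif rest
    else if motif_sequence = indel_motif then
      let motif_size := PySem.Str.len indel_motif
      let motif_change := (get_motif_change indel indel_type indel_motif).getD ""
      let str_status := if motif_size < 7 then "True" else "False"
      [str_status, indel_motif, PySem.Int.toStr motif_size, start_pos, consensus_len, motif_change]
    else get_motif_loop indel indel_type indel_motif rest

def get_motif (variant_info : List String) (motif_list : List (String × String × String × Int)) : List String :=
  let p := get_indel variant_info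
  let indel := p.1
  let indel_type := p.2
  let indel_motif :=
    match find_subunit indel with
    | none => indel
    | some x => if x.toList = [] then indel else x   -- `if not indel_motif`
  get_motif_loop indel indel_type indel_motif motif_list

-- ===== PORT B =====
-- hand port of Python string repetition `w * k` (exact: k ≤ 0 gives '')
def pvRepN (w : List Char) : Nat → List Char
  | 0 => []
  | k + 1 => w ++ pvRepN w k

def pvRep (w : List Char) (k : Int) : List Char := pvRepN w k.toNat

-- next((indel[:d] for d in range(1, n) if n % d == 0 and indel[:d] * (n // d) == indel), ...)
def pvSubunit (cs : List Char) : Option (List Char) :=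
  let n : Int := cs.length
  ((PySem.List.pyRange 1 n).find? fun d =>
      (PySem.Int.mod n d == 0) &&
      (pvRep (PySem.Chars.slice cs none (some d)) (PySem.Int.floordiv n d) == cs)).map
    fun d => PySem.Chars.slice cs none (some d)

def get_motif_alt (variant_info : List String) (motif_list : List (String × String × String × Int)) : List String :=
  let p := if 1 < PySem.Str.len (PySem.List.pyGetD variant_info 3 "") then
      (PySem.List.pyGetD variant_info 3 "", "-")
    else (PySem.List.pyGetD variant_info 4 "", "+")
  let indel := p.1
  let sign := p.2
  let cs := indel.toList
  let motif : List Char := (pvSubunit cs).getD cs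
  match motif_list.find? (fun m => (m.2.2.2 == 100) && (m.1.toList == motif)) with
  | none => [PySem.Int.toStr (PySem.Str.len indel)]
  | some (_, consensus_len, start_pos, _) =>
    [if motif.length < 7 then "True" else "False", String.ofList motif,
     PySem.Int.toStr (motif.length : Int), start_pos, consensus_len,
     sign ++ PySem.Int.toStr (PySem.Chars.count cs motif)]

-- ===== PRECONDITION & SPEC =====
-- Pre_ excludes exactly the inputs where A raises IndexError: variant_info must have an index 3,
-- and when len(variant_info[3]) ≤ 1 also an index 4.
def Pre_get_motif (variant_info : List String) (motif_list : List (String × String × String × Int)) : Prop :=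
  4 ≤ variant_info.length ∧ (1 < (variant_info.getD 3 "").toList.length ∨ 5 ≤ variant_info.length)
instance (variant_info : List String) (motif_list : List (String × String × String × Int)) : Decidable (Pre_get_motif variant_info motif_list) := by unfold Pre_get_motif; infer_instance

def pvWitness_get_motif : List String × (List (String × String × String × Int)) :=
  (["chrX", "100", ".", "ATAT", "A"], [("AT", "10", "5", 100)])

def Spec_get_motif (variant_info : List String) (motif_list : List (String × String × String × Int)) (out : List String) : Prop := out = get_motif_alt variant_info motif_list
instance (variant_info : List String) (motif_list : List (String × String × String × Int)) (out : List String) : Decidable (Spec_get_motif variant_info motif_list out) := by unfold Spec_get_motif; infer_instance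

-- ===== CLAIM (what is proved, stated in full; the proofs are below) =====
def Claim_equal_get_motif : Prop := ∀ (variant_info : List String) (motif_list : List (String × String × String × Int)), Dom_get_motif variant_info motif_list → Pre_get_motif variant_info motif_list → Spec_get_motif variant_info motif_list (get_motif variant_info motif_list)

-- ===== LEMMAS AND PROOFS =====

theorem length_pvRepN (w : List Char) (k : Nat) : (pvRepN w k).length = k * w.length := by
  induction k with
  | zero => simp [pvRepN]
  | succ k ih => simp [pvRepN, ih, Nat.succ_mul]; omega

theorem pvRepN_comm (w : List Char) (k : Nat) : pvRepN w k ++ w = w ++ pvRepN w k := by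
  induction k with
  | zero => simp [pvRepN]
  | succ k ih => simp only [pvRepN, List.append_assoc, ih]

theorem rotate_pvRepN (w : List Char) (k : Nat) :
    (pvRepN w (k + 1)).rotate w.length = pvRepN w (k + 1) := by
  have hle : w.length ≤ (pvRepN w (k + 1)).length := by
    rw [length_pvRepN]; nlinarith
  rw [List.rotate_eq_drop_append_take hle]
  show (List.drop w.length (w ++ pvRepN w k)) ++ (List.take w.length (w ++ pvRepN w k)) = _
  rw [List.drop_left, List.take_left]
  exact pvRepN_comm w k

theorem rep_of_rotate : ∀ (k : Nat) (cs : List Char) (d : Nat), 0 < d →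
    cs.length = k * d → cs.rotate d = cs → cs = pvRepN (cs.take d) k := by
  intro k
  induction k with
  | zero =>
    intro cs d _ hlen _
    simp only [Nat.zero_mul] at hlen
    simp [List.length_eq_zero_iff.mp hlen, pvRepN]
  | succ k ih =>
    intro cs d hd hlen hrot
    have hdle : d ≤ cs.length := by rw [hlen, Nat.succ_mul]; omega
    have hwlen : (cs.take d).length = d := by simp [List.length_take]; omega
    have hsplit : cs.take d ++ cs.drop d = cs := List.take_append_drop d cs
    rw [List.rotate_eq_drop_append_take hdle] at hrot
    cases k with
    | zero =>
      have hr : cs.drop d = [] := by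
        rw [← List.length_eq_zero_iff, List.length_drop, hlen]; omega
      have heq : cs = cs.take d := by
        conv_lhs => rw [← hsplit, hr]
        rw [List.append_nil]
      have hrep1 : pvRepN (cs.take d) (0 + 1) = cs.take d := by simp [pvRepN]
      rw [hrep1]
      exact heq
    | succ k' =>
      have hrlen : (cs.drop d).length = (k' + 1) * d := by
        rw [List.length_drop, hlen]; rw [Nat.succ_mul, Nat.succ_mul]; omega
      have hdr : d ≤ (cs.drop d).length := by rw [hrlen, Nat.succ_mul]; omega
      have comm : cs.drop d ++ cs.take d = cs.take d ++ cs.drop d := by rw [hrot, hsplit]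
      have htake : (cs.drop d).take d = cs.take d := by
        have h1 := congrArg (List.take d) comm
        rw [List.take_append, List.take_append] at h1
        simp only [List.take_take, Nat.sub_eq_zero_of_le hdr, hwlen, Nat.sub_self,
          Nat.zero_min, List.take_zero, List.append_nil, Nat.min_self] at h1
        exact h1
      have hdrop : (cs.drop d).drop d ++ cs.take d = cs.drop d := by
        have h1 := congrArg (List.drop d) comm
        rw [List.drop_append_of_le_length hdr, List.drop_append] at h1
        simp only [List.drop_take, Nat.sub_self, List.take_zero,
          List.length_take, Nat.min_eq_left hdle, List.drop_zero, List.nil_append] at h1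
        exact h1
      have hrot' : (cs.drop d).rotate d = cs.drop d := by
        rw [List.rotate_eq_drop_append_take hdr, htake, hdrop]
      have h2 : cs.drop d = pvRepN (cs.take d) (k' + 1) := by
        rw [ih (cs.drop d) d hd hrlen hrot', htake]
      conv_lhs => rw [← hsplit, h2]
      simp [pvRepN]

theorem rotate_multiple (cs : List Char) (i : Nat) (h : cs.rotate i = cs) :
    ∀ k : Nat, cs.rotate (k * i) = cs := by
  intro k
  induction k with
  | zero => simp
  | succ k ih => rw [Nat.succ_mul, ← List.rotate_rotate, ih, h]

theorem rotate_gcd (cs : List Char) (i : Nat) (h : cs.rotate i = cs) :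
    cs.rotate (Nat.gcd i cs.length) = cs := by
  by_cases hm : cs.length = 0
  · rw [List.length_eq_zero_iff.mp hm]; simp
  by_cases hg : Nat.gcd i cs.length = cs.length
  · rw [hg]; exact List.rotate_length cs
  have hm' : 0 < cs.length := Nat.pos_of_ne_zero hm
  have hglt : Nat.gcd i cs.length < cs.length :=
    lt_of_le_of_ne (Nat.gcd_le_right i hm') hg
  set m := cs.length with hmdef
  set g := Nat.gcd i m with hgdef
  have hbez : (g : ℤ) = i * Nat.gcdA i m + m * Nat.gcdB i m := Nat.gcd_eq_gcd_ab i m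
  set u := Nat.gcdA i m with hudef
  have hmne : (m : ℤ) ≠ 0 := by exact_mod_cast hm
  set k : ℕ := (u % (m : ℤ)).toNat with hkdef
  have hk : (k : ℤ) = u % (m : ℤ) := Int.toNat_of_nonneg (Int.emod_nonneg u hmne)
  have key : ((k * i : ℕ) : ℤ) % (m : ℤ) = ((g : ℕ) : ℤ) % (m : ℤ) := by
    push_cast
    rw [hk]
    calc (u % (m:ℤ)) * (i:ℤ) % (m:ℤ)
        = u * (i:ℤ) % (m:ℤ) := by
          rw [Int.mul_emod, Int.emod_emod_of_dvd u dvd_rfl, ← Int.mul_emod]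
      _ = ((g:ℤ) - (m:ℤ) * Nat.gcdB i m) % (m:ℤ) := by
          congr 1
          rw [hbez]; ring
      _ = (g:ℤ) % (m:ℤ) := by
          rw [Int.sub_emod, Int.mul_emod_right, sub_zero, Int.emod_emod_of_dvd _ dvd_rfl]
  have keyN : (k * i) % m = g % m := by exact_mod_cast key
  have hgm : g % m = g := Nat.mod_eq_of_lt hglt
  have : cs.rotate ((k * i) % m) = cs := by
    rw [List.rotate_mod]
    exact rotate_multiple cs i h k
  rw [← hgm, ← keyN]
  exact this

theorem prefix_rotate (cs : List Char) (i : Nat) (hi : i ≤ cs.length) :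
    cs <+: (cs.drop i ++ cs) ↔ cs.rotate i = cs := by
  rw [List.prefix_iff_eq_take, List.take_append, List.length_drop,
    List.take_of_length_le (by rw [List.length_drop]; omega), Nat.sub_sub_self hi,
    List.rotate_eq_drop_append_take hi]
  exact eq_comm

-- the expression A's find_subunit computes, at the List Char level
def pvAFind (cs : List Char) : Int := PySem.Chars.findFrom (cs ++ cs) cs 1 (some (-1))

theorem findFrom_eval (cs : List Char) (hm : 1 ≤ cs.length) :
    pvAFind cs =
      (if PySem.Chars.find (((cs ++ cs).take (cs.length + cs.length - 1)).drop 1) cs = -1 then -1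
       else 1 + PySem.Chars.find (((cs ++ cs).take (cs.length + cs.length - 1)).drop 1) cs) := by
  unfold pvAFind PySem.Chars.findFrom
  simp only [List.length_append]
  have c1 : ¬ (((cs.length + cs.length : ℕ) : ℤ) < -1) := by push_cast; omega
  have c2 : ¬ ((-1 : ℤ) + ((cs.length + cs.length : ℕ) : ℤ) < 0) := by push_cast; omega
  simp only [if_neg c1, if_neg c2]
  norm_num
  have c4 : ¬ ((cs.length : ℤ) + (cs.length : ℤ) ≤ 1) := by omega
  have h5' : ((-1 : ℤ) + ((cs.length : ℤ) + (cs.length : ℤ))).toNat = cs.length + cs.length - 1 := by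
    omega
  rw [if_neg c4, h5']

theorem prefix_dropT_iff (cs : List Char) (hm : 1 ≤ cs.length) (j : Nat) :
    cs <+: ((((cs ++ cs).take (cs.length + cs.length - 1)).drop 1).drop j) ↔
      (j + 2 ≤ cs.length ∧ cs.rotate (j + 1) = cs) := by
  rw [List.drop_drop, Nat.add_comm 1 j, List.drop_take, List.prefix_take_iff]
  constructor
  · rintro ⟨hpre, hlen⟩
    have hb : j + 2 ≤ cs.length := by omega
    refine ⟨hb, ?_⟩
    rw [List.drop_append_of_le_length (by omega)] at hpre
    exact (prefix_rotate cs (j + 1) (by omega)).mp hpre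
  · rintro ⟨hb, hrot⟩
    constructor
    · rw [List.drop_append_of_le_length (by omega)]
      exact (prefix_rotate cs (j + 1) (by omega)).mpr hrot
    · omega

def pvPA (cs : List Char) (i : Nat) : Prop := 1 ≤ i ∧ i < cs.length ∧ cs.rotate i = cs
def pvPB (cs : List Char) (d : Nat) : Prop :=
  1 ≤ d ∧ d < cs.length ∧ d ∣ cs.length ∧ pvRepN (cs.take d) (cs.length / d) = cs

theorem pvPB_imp_pvPA (cs : List Char) (d : Nat) (h : pvPB cs d) : pvPA cs d := by
  obtain ⟨h1, h2, hdvd, hrep⟩ := h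
  refine ⟨h1, h2, ?_⟩
  have hdle : d ≤ cs.length := le_of_lt h2
  have hwlen : (cs.take d).length = d := by simp [List.length_take]; omega
  obtain ⟨k, hk⟩ : ∃ k, cs.length / d = k + 1 := by
    have : 1 ≤ cs.length / d := (Nat.one_le_div_iff (by omega)).mpr hdle
    exact ⟨cs.length / d - 1, by omega⟩
  rw [hk] at hrep
  have hr := rotate_pvRepN (cs.take d) k
  rw [hrep, hwlen] at hr
  exact hr

theorem pvPA_min_imp_pvPB (cs : List Char) (i : Nat) (h : pvPA cs i)
    (hmin : ∀ j, pvPA cs j → i ≤ j) : pvPB cs i := by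
  obtain ⟨h1, h2, hrot⟩ := h
  have hg := rotate_gcd cs i hrot
  have hgpos : 1 ≤ Nat.gcd i cs.length := Nat.gcd_pos_of_pos_left _ h1
  have hgle : Nat.gcd i cs.length ≤ i := Nat.le_of_dvd h1 (Nat.gcd_dvd_left i cs.length)
  have hglt : Nat.gcd i cs.length < cs.length := lt_of_le_of_lt hgle h2
  have hile : i ≤ Nat.gcd i cs.length := hmin _ ⟨hgpos, hglt, hg⟩
  have hieq : Nat.gcd i cs.length = i := le_antisymm hgle hile
  have hdvd : i ∣ cs.length := hieq ▸ Nat.gcd_dvd_right i cs.length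
  exact ⟨h1, h2, hdvd,
    (rep_of_rotate (cs.length / i) cs i h1 (Nat.div_mul_cancel hdvd).symm hrot).symm⟩

theorem find?_pyRange_eq_some_of (q : Int → Bool) (b x : Int) :
    ∀ (n : Nat) (a : Int), (b - a).toNat ≤ n → a ≤ x → x < b → q x = true →
    (∀ y, a ≤ y → y < x → q y = false) → (PySem.List.pyRange a b).find? q = some x := by
  intro n
  induction n with
  | zero => intro a h0 hax hxb _ _; exfalso; omega
  | succ n ih =>
    intro a hfuel hax hxb hq hmin
    have hab : a < b := lt_of_le_of_lt hax hxb
    rw [PySem.List.pyRange_one_cons hab]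
    by_cases hax' : a = x
    · subst hax'
      rw [List.find?_cons_of_pos hq]
    · have hlt : a < x := lt_of_le_of_ne hax hax'
      rw [List.find?_cons_of_neg (by simp [hmin a le_rfl hlt])]
      exact ih (a + 1) (by omega) (by omega) hxb hq (fun y hy1 hy2 => hmin y (by omega) hy2)

-- B's search predicate, characterized for 1 ≤ d < len
theorem pvSubunit_pred_iff (cs : List Char) (d : Int) (h1 : 1 ≤ d) (h2 : d < (cs.length : Int)) :
    (((PySem.Int.mod (cs.length : Int) d == 0) &&
      (pvRep (PySem.Chars.slice cs none (some d)) (PySem.Int.floordiv (cs.length : Int) d) == cs)) = true)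
      ↔ pvPB cs d.toNat := by
  have hdn : ((d.toNat : ℕ) : ℤ) = d := Int.toNat_of_nonneg (by omega)
  rw [Bool.and_eq_true, beq_iff_eq, beq_iff_eq, PySem.Int.mod_eq_zero_iff_dvd,
    PySem.Chars.slice_eq_listSlice, PySem.List.slice_to cs (by omega : (0 : ℤ) ≤ d),
    PySem.Int.floordiv_eq_ediv_of_pos (by omega : (0 : ℤ) < d)]
  unfold pvRep
  rw [← hdn, Int.natCast_dvd_natCast, ← Int.natCast_ediv, Int.toNat_natCast, Int.toNat_natCast]
  unfold pvPB
  constructor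
  · rintro ⟨hdvd, hrep⟩
    exact ⟨by omega, by omega, hdvd, hrep⟩
  · rintro ⟨_, _, hdvd, hrep⟩
    exact ⟨hdvd, hrep⟩

theorem subunit_eq (cs : List Char) :
    (if pvAFind cs = -1 then none else some (cs.take (pvAFind cs).toNat)) = pvSubunit cs := by
  by_cases hm : cs.length = 0
  · have hnil : cs = [] := List.length_eq_zero_iff.mp hm
    subst hnil
    decide
  have hm1 : 1 ≤ cs.length := Nat.pos_of_ne_zero hm
  set t := ((cs ++ cs).take (cs.length + cs.length - 1)).drop 1 with ht
  have hval : pvAFind cs =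
      (if PySem.Chars.find t cs = -1 then -1 else 1 + PySem.Chars.find t cs) :=
    findFrom_eval cs hm1
  by_cases hf : PySem.Chars.find t cs = -1
  · have hA : pvAFind cs = -1 := by rw [hval, if_pos hf]
    rw [hA, if_pos rfl]
    have hnone : ((PySem.List.pyRange 1 (cs.length : ℤ)).find? fun d =>
        (PySem.Int.mod (cs.length : ℤ) d == 0) &&
        (pvRep (PySem.Chars.slice cs none (some d)) (PySem.Int.floordiv (cs.length : ℤ) d) == cs))
        = none := by
      rw [List.find?_eq_none]
      intro d hd
      rw [PySem.List.mem_pyRange_one] at hd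
      intro hq
      have hpb := (pvSubunit_pred_iff cs d hd.1 hd.2).mp hq
      have hpa := pvPB_imp_pvPA cs d.toNat hpb
      obtain ⟨ha1, ha2, harot⟩ := hpa
      have hpre : cs <+: t.drop (d.toNat - 1) := by
        rw [ht]
        refine (prefix_dropT_iff cs hm1 (d.toNat - 1)).mpr ⟨by omega, ?_⟩
        have hstep : d.toNat - 1 + 1 = d.toNat := by omega
        rw [hstep]
        exact harot
      have hisin := (PySem.Chars.exists_prefix_drop_iff_isIn cs t).mp ⟨_, hpre⟩
      exact ((PySem.Chars.find_eq_neg_one_iff t cs).mp hf)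
        ((PySem.Chars.isIn_iff_infix cs t).mp hisin)
    simp only [pvSubunit]
    rw [hnone]
    rfl
  · have hge : 0 ≤ PySem.Chars.find t cs := by
      have hge' := PySem.Chars.neg_one_le_find t cs
      omega
    set f := PySem.Chars.find t cs with hfdef
    obtain ⟨hpre, hminp⟩ := PySem.Chars.find_spec (s := t) (sub := cs) hge
    obtain ⟨hb2, hrot⟩ := (prefix_dropT_iff cs hm1 f.toNat).mp hpre
    have hpa : pvPA cs (f.toNat + 1) := ⟨by omega, by omega, hrot⟩
    have hminA : ∀ j, pvPA cs j → f.toNat + 1 ≤ j := by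
      intro j hj
      obtain ⟨hj1, hj2, hjrot⟩ := hj
      by_contra hcon
      rw [not_le] at hcon
      refine hminp (j - 1) (by omega) ?_
      refine (prefix_dropT_iff cs hm1 (j - 1)).mpr ⟨by omega, ?_⟩
      have hstep : j - 1 + 1 = j := by omega
      rw [hstep]
      exact hjrot
    have hpb := pvPA_min_imp_pvPB cs (f.toNat + 1) hpa hminA
    have hsome : ((PySem.List.pyRange 1 (cs.length : ℤ)).find? fun d =>
        (PySem.Int.mod (cs.length : ℤ) d == 0) &&
        (pvRep (PySem.Chars.slice cs none (some d)) (PySem.Int.floordiv (cs.length : ℤ) d) == cs))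
        = some ((f.toNat + 1 : ℕ) : ℤ) := by
      refine find?_pyRange_eq_some_of _ (cs.length : ℤ) ((f.toNat + 1 : ℕ) : ℤ) cs.length 1
        (by omega) (by push_cast; omega) (by push_cast; omega) ?_ ?_
      · refine (pvSubunit_pred_iff cs _ (by push_cast; omega) (by push_cast; omega)).mpr ?_
        rw [Int.toNat_natCast]
        exact hpb
      · intro y hy1 hy2
        by_contra hcon
        rw [Bool.not_eq_false] at hcon
        have hylt : y < (cs.length : ℤ) := by push_cast at hy2 ⊢; omega
        have hpby := (pvSubunit_pred_iff cs y hy1 hylt).mp hcon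
        have hpay := pvPB_imp_pvPA cs y.toNat hpby
        have := hminA y.toNat hpay
        omega
    have hA : pvAFind cs = 1 + f := by rw [hval, if_neg hf]
    rw [hA, if_neg (by omega)]
    simp only [pvSubunit]
    rw [hsome]
    simp only [Option.map_some]
    rw [PySem.Chars.slice_eq_listSlice, PySem.List.slice_to cs (by push_cast; omega)]
    have hnat : (1 + f).toNat = f.toNat + 1 := by omega
    rw [hnat, Int.toNat_natCast]

theorem pvAFind_cases (cs : List Char) : pvAFind cs = -1 ∨ (1 ≤ pvAFind cs ∧ pvAFind cs < (cs.length : Int)) := by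
  by_cases hm : cs.length = 0
  · left
    have hnil : cs = [] := List.length_eq_zero_iff.mp hm
    subst hnil
    decide
  have hm1 : 1 ≤ cs.length := Nat.pos_of_ne_zero hm
  set t := ((cs ++ cs).take (cs.length + cs.length - 1)).drop 1 with ht
  have hval : pvAFind cs =
      (if PySem.Chars.find t cs = -1 then -1 else 1 + PySem.Chars.find t cs) :=
    findFrom_eval cs hm1
  by_cases hf : PySem.Chars.find t cs = -1
  · left
    rw [hval, if_pos hf]
  · right
    have hge : 0 ≤ PySem.Chars.find t cs := by
      have hge' := PySem.Chars.neg_one_le_find t cs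
      omega
    obtain ⟨hpre, _⟩ := PySem.Chars.find_spec (s := t) (sub := cs) hge
    obtain ⟨hb2, _⟩ := (prefix_dropT_iff cs hm1 (PySem.Chars.find t cs).toNat).mp hpre
    rw [hval, if_neg hf]
    constructor
    · omega
    · omega

theorem subunit_agree (s : String) :
    (match find_subunit s with
     | none => s
     | some x => if x.toList = [] then s else x) =
    String.ofList ((pvSubunit s.toList).getD s.toList) := by
  have hA : find_subunit s = (if pvAFind s.toList = -1 then none
      else some (PySem.Str.slice s none (some (pvAFind s.toList)))) := by
    unfold find_subunit pvAFind
    simp [PySem.Str.findFrom_eq]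
  rw [← subunit_eq s.toList]
  rcases pvAFind_cases s.toList with he | ⟨he1, he2⟩
  · rw [hA, if_pos he, if_pos he]
    simp [String.ofList_toList]
  · have hne : pvAFind s.toList ≠ -1 := by omega
    have hmlen : 1 ≤ s.toList.length := by omega
    have hxl : (PySem.Str.slice s none (some (pvAFind s.toList))).toList
        = s.toList.take (pvAFind s.toList).toNat := by
      rw [PySem.Str.toList_slice, PySem.Chars.slice_eq_listSlice,
        PySem.List.slice_to s.toList (by omega)]
    have hnonnil : ¬ ((PySem.Str.slice s none (some (pvAFind s.toList))).toList = []) := by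
      rw [hxl]
      intro hcon
      have hlen0 := congrArg List.length hcon
      rw [List.length_take, List.length_nil] at hlen0
      omega
    rw [hA, if_neg hne, if_neg hne]
    show (if _ = ([] : List Char) then s else _) = _
    rw [if_neg hnonnil]
    apply String.toList_inj.mp
    simp [hxl]

theorem loop_eq (indel t im : String) (motif : List Char) (him : im.toList = motif) (sign : String)
    (hchange : (get_motif_change indel t im).getD "" =
      sign ++ PySem.Int.toStr (PySem.Chars.count indel.toList motif)) :
    ∀ ml : List (String × String × String × Int),
      get_motif_loop indel t im ml =
        match ml.find? (fun m => (m.2.2.2 == 100) && (m.1.toList == motif)) with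
        | none => [PySem.Int.toStr (PySem.Str.len indel)]
        | some (_, consensus_len, start_pos, _) =>
          [if motif.length < 7 then "True" else "False", String.ofList motif,
           PySem.Int.toStr (motif.length : Int), start_pos, consensus_len,
           sign ++ PySem.Int.toStr (PySem.Chars.count indel.toList motif)] := by
  intro ml
  induction ml with
  | nil => rfl
  | cons hd tl ih =>
    obtain ⟨ms, cl, sp, pu⟩ := hd
    by_cases hpu : pu = 100
    · subst hpu
      by_cases hms : ms = im
      · subst hms
        simp only [get_motif_loop]
        rw [if_neg (by simp), if_pos (by trivial)]
        rw [List.find?_cons_of_pos (by simp [him])]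
        have hlen : PySem.Str.len ms = (motif.length : Int) := by
          simp [him]
        rw [hlen]
        have hstat : ((motif.length : Int) < 7) ↔ (motif.length < 7) := by
          constructor <;> (intro h; omega)
        have him' : ms = String.ofList motif := by
          rw [← him, String.ofList_toList]
        rw [hchange]
        simp only [him']
        congr 1
        · simp [hstat]
      · simp only [get_motif_loop]
        rw [if_neg (by simp), if_neg hms]
        rw [List.find?_cons_of_neg (by
          simp only [Bool.and_eq_true, beq_iff_eq, not_and]
          intro _ hcon
          exact hms (String.toList_inj.mp (him ▸ hcon)))]
        exact ih
    · simp only [get_motif_loop]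
      rw [if_pos hpu]
      rw [List.find?_cons_of_neg (by simp [hpu])]
      exact ih

theorem get_motif_branch (indel sign ty : String)
    (hty : (ty = "insertion" ∧ sign = "+") ∨ (ty = "deletion" ∧ sign = "-"))
    (ml : List (String × String × String × Int)) :
    get_motif_loop indel ty
      (match find_subunit indel with
       | none => indel
       | some x => if x.toList = [] then indel else x) ml =
    (let motif : List Char := (pvSubunit indel.toList).getD indel.toList
     match ml.find? (fun m => (m.2.2.2 == 100) && (m.1.toList == motif)) with
     | none => [PySem.Int.toStr (PySem.Str.len indel)]
     | some (_, consensus_len, start_pos, _) =>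
       [if motif.length < 7 then "True" else "False", String.ofList motif,
        PySem.Int.toStr (motif.length : Int), start_pos, consensus_len,
        sign ++ PySem.Int.toStr (PySem.Chars.count indel.toList motif)]) := by
  rw [subunit_agree indel]
  apply loop_eq
  · simp
  · unfold get_motif_change
    rcases hty with ⟨hty, hsign⟩ | ⟨hty, hsign⟩ <;> subst hty <;> subst hsign
    · rw [if_pos rfl]
      simp [PySem.Str.count_eq]
    · rw [if_neg (by decide), if_pos rfl]
      simp [PySem.Str.count_eq]

-- ===== VERDICT (by name: the statement is the Claim_ definition above) =====
theorem get_motif_spec : Claim_equal_get_motif := by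
  intro vi ml _ _
  unfold Spec_get_motif get_motif get_motif_alt get_indel
  by_cases hc : 1 < PySem.Str.len (PySem.List.pyGetD vi 3 "")
  · rw [if_pos hc, if_pos hc]
    exact get_motif_branch _ "-" "deletion" (Or.inr ⟨rfl, rfl⟩) ml
  · rw [if_neg hc, if_neg hc]
    exact get_motif_branch _ "+" "insertion" (Or.inl ⟨rfl, rfl⟩) ml
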